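-- pv_equiv track=rewrite | github.com/ZeroCool2u/CensusQuery | CensusQuery.py | nameIndex
-- ===== SOURCE A (Python) =====
-- def nameIndex(names):
--     '''Produces a dictionary that uses the baby name as a key, with each value consisting
--    consisting of a list of tuples (year,male,female). Tuples within each name are sorted by
--    birth year.'''
--
--     # Creates a dict called babyNames with var name as the key and instantiates a empty list.
--     babyNames = {name: [] for year, name, gender, count in names}
--
--     # for loop going through the entire list and assigning a variable name to each value in the list of lists.
--     # (Naming each column.)
--     for year, name, gender, count in names:
--         # Assumption for base case, as most names will not be androgenous.
--         androgenous = False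
--
--         for yearTuple in range(len(babyNames[name])):
--
--             if babyNames[name][yearTuple][0] == year:
--                 androgenous = True
--                 a, b, c = babyNames[name][yearTuple]
--
--                 if gender == 'M':
--                     babyNames[name][yearTuple] = year, count, c
--
--                 else:
--                     babyNames[name][yearTuple] = year, b, count
--
--         if androgenous == False:  # Androgenous comparison for the sketchy names.
--
--             # if the gender is Male, then add to the male column. Male column is the middle, female is last.
--             if gender == 'M':
--                 nameEntry = year, count, 0
--
--             else:
--                 # else, gender is female and last column is modified, because female coulmn is last.
--                 nameEntry = year, 0, count
--             babyNames[name].append(nameEntry)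
--
--     # for loops used for sorting
--     for name in babyNames:
--         babyNames[name].sort()
--
--     return babyNames
-- ===== SOURCE B (Python) =====
-- def _nameEntries(names, name):
--     '''Entries for one name, built directly: its sorted distinct years, each paired
--     with the last male and last female counts found for that (name, year).'''
--     mine = [r for r in names if r[1] == name]
--     entries = []
--     for y in sorted({r[0] for r in mine}):
--         m = f = 0
--         for year, _, gender, count in mine:
--             if year == y:
--                 if gender == 'M':
--                     m = count
--                 else:
--                     f = count
--         entries.append((y, m, f))
--     return entries
--
-- def nameIndex(names):
--     '''Direct construction instead of incremental aggregation: for each name (first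
--     occurrence order) take its records, list its distinct years sorted, and compute
--     each (year, male, female) cell by a last-wins scan of that name's records.'''
--     out = {}
--     for year, name, gender, count in names:
--         if name not in out:
--             out[name] = _nameEntries(names, name)
--     return out
-- ===== Notes on version B (the rewrite author's own statement) =====
-- stated objective: alternative
-- what changed: A aggregates incrementally, scanning and updating each name's accumulated tuple list per record and sorting at the end; B constructs each name's value directly: filter that name's records, list its distinct years sorted, and fill each (year, male, female) cell by a last-wins scan.
import Mathlib
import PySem

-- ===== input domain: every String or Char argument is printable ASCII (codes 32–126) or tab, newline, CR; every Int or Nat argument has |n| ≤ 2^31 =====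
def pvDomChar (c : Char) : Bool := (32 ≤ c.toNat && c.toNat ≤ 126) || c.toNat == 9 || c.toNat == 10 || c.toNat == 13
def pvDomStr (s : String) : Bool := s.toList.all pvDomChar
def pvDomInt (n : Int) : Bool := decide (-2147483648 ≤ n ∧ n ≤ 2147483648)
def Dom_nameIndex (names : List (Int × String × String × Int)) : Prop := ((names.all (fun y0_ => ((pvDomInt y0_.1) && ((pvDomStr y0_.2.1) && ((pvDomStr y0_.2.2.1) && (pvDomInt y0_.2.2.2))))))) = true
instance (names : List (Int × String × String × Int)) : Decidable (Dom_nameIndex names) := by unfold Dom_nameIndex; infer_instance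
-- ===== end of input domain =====

-- B replaces A's incremental per-record aggregation (in-place tuple updates plus a final
-- per-name sort) by direct construction: for each name, its sorted distinct years, each
-- cell computed by a last-wins scan of that name's records (alternative decomposition).

-- ===== PORT A =====

-- Python's `<` on (Int, Int, Int) tuples is the lexicographic order: sort with a Lex key.
def tripleKey (t : Int × Int × Int) : Lex (Int × Lex (Int × Int)) := toLex (t.1, toLex (t.2.1, t.2.2))

-- `xs.sort()` / `sorted(xs)` on int triples (shared sort primitive of both ports)
def pySortTuples (xs : List (Int × Int × Int)) : List (Int × Int × Int) :=
  PySem.List.sorted xs tripleKey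

-- the body of A's inner `for yearTuple in range(len(babyNames[name])): …` loop
def innerStep (year count : Int) (gM : Bool)
    (st : List (Int × Int × Int) × Bool) (j : Int) : List (Int × Int × Int) × Bool :=
  let t := PySem.List.pyGetD st.1 j (0, 0, 0)
  if t.1 == year then
    (PySem.List.pySetD st.1 j (if gM then (year, count, t.2.2) else (year, t.2.1, count)), true)
  else st

-- A's inner scan: returns the updated list and the `androgenous` flag
def nameIndexInner (year count : Int) (gM : Bool)
    (lst : List (Int × Int × Int)) : List (Int × Int × Int) × Bool :=
  (PySem.List.pyRange 0 (lst.length : Int) 1).foldl (innerStep year count gM) (lst, false)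

def nameIndex (names : List (Int × String × String × Int)) : List (String × List (Int × Int × Int)) :=
  -- babyNames = {name: [] for year, name, gender, count in names}
  let babyNames : PySem.Dict String (List (Int × Int × Int)) :=
    names.foldl (fun d r => d.insert r.2.1 []) PySem.Dict.empty
  -- main loop; `babyNames[name]` is ported as getD _ [] — exact, the key was pre-seeded above
  let babyNames :=
    names.foldl (fun d r =>
      d.insert r.2.1
        (if (nameIndexInner r.1 r.2.2.2 (r.2.2.1 == "M") (d.getD r.2.1 [])).2 then
          (nameIndexInner r.1 r.2.2.2 (r.2.2.1 == "M") (d.getD r.2.1 [])).1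
        else
          (nameIndexInner r.1 r.2.2.2 (r.2.2.1 == "M") (d.getD r.2.1 [])).1 ++
            [if r.2.2.1 == "M" then (r.1, r.2.2.2, 0) else (r.1, 0, r.2.2.2)]))
      babyNames
  -- for name in babyNames: babyNames[name].sort()
  let babyNames := babyNames.keys.foldl (fun d name => d.modify name [] pySortTuples) babyNames
  babyNames.items

-- ===== PORT B =====

-- the inner `for year, _, gender, count in mine: if year == y: …` last-wins scan
def lastCounts (mine : List (Int × String × String × Int)) (y : Int) : Int × Int :=
  mine.foldl (fun mf r =>
      if r.1 == y then (if r.2.2.1 == "M" then (r.2.2.2, mf.2) else (mf.1, r.2.2.2)) else mf)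
    (0, 0)

-- _nameEntries(names, name): filter, sorted distinct years, one (y, m, f) cell per year
def nameEntries (names : List (Int × String × String × Int)) (n : String) : List (Int × Int × Int) :=
  let mine := names.filter (fun r => r.2.1 == n)
  (PySem.List.sorted (PySem.Set.ofList (mine.map (fun r => r.1))) (fun y => y)).map
    (fun y => (y, lastCounts mine y))

def nameIndex_alt (names : List (Int × String × String × Int)) : List (String × List (Int × Int × Int)) :=
  (names.foldl (fun out r =>
      if out.contains r.2.1 then out else out.insert r.2.1 (nameEntries names r.2.1))
    PySem.Dict.empty).items

-- ===== PRECONDITION & SPEC =====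
def Spec_nameIndex (names : List (Int × String × String × Int)) (out : List (String × List (Int × Int × Int))) : Prop := out = nameIndex_alt names
instance (names : List (Int × String × String × Int)) (out : List (String × List (Int × Int × Int))) : Decidable (Spec_nameIndex names out) := by unfold Spec_nameIndex; infer_instance

-- ===== CLAIM (what is proved, stated in full; the proofs are below) =====
def Claim_equal_nameIndex : Prop := ∀ (names : List (Int × String × String × Int)), Dom_nameIndex names → Spec_nameIndex names (nameIndex names)

-- ===== LEMMAS AND PROOFS =====

-- named stages of A's port (definitionally the port's lets)
def seedA (names : List (Int × String × String × Int)) : PySem.Dict String (List (Int × Int × Int)) :=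
  names.foldl (fun d r => d.insert r.2.1 []) PySem.Dict.empty

def loopA (names : List (Int × String × String × Int)) : PySem.Dict String (List (Int × Int × Int)) :=
  names.foldl (fun d r =>
      d.insert r.2.1
        (if (nameIndexInner r.1 r.2.2.2 (r.2.2.1 == "M") (d.getD r.2.1 [])).2 then
          (nameIndexInner r.1 r.2.2.2 (r.2.2.1 == "M") (d.getD r.2.1 [])).1
        else
          (nameIndexInner r.1 r.2.2.2 (r.2.2.1 == "M") (d.getD r.2.1 [])).1 ++
            [if r.2.2.1 == "M" then (r.1, r.2.2.2, 0) else (r.1, 0, r.2.2.2)]))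
    (seedA names)

def sortA (names : List (Int × String × String × Int)) : PySem.Dict String (List (Int × Int × Int)) :=
  (loopA names).keys.foldl (fun d name => d.modify name [] pySortTuples) (loopA names)

-- proof-side grouping dict: per name, a year -> (male, female) dict (used only as an
-- intermediate characterisation of A's per-name lists)
def aggD (names : List (Int × String × String × Int)) : PySem.Dict String (PySem.Dict Int (Int × Int)) :=
  names.foldl (fun idx r =>
      idx.insert r.2.1
        ((idx.getD r.2.1 PySem.Dict.empty).insert r.1
          (if r.2.2.1 == "M" then (r.2.2.2, ((idx.getD r.2.1 PySem.Dict.empty).getD r.1 (0, 0)).2)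
           else (((idx.getD r.2.1 PySem.Dict.empty).getD r.1 (0, 0)).1, r.2.2.2))))
    PySem.Dict.empty

-- the per-name year dict of one name's records
def dictAgg (rs : List (Int × String × String × Int)) : PySem.Dict Int (Int × Int) :=
  rs.foldl (fun d r =>
      d.insert r.1
        (if r.2.2.1 == "M" then (r.2.2.2, (d.getD r.1 (0, 0)).2)
         else ((d.getD r.1 (0, 0)).1, r.2.2.2)))
    PySem.Dict.empty

lemma nameIndex_eq (names : List (Int × String × String × Int)) :
    nameIndex names = (sortA names).items := rfl

-- the per-record update A applies to a matching (year, m, f) tuple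
def updTriple (year count : Int) (gM : Bool) (t : Int × Int × Int) : Int × Int × Int :=
  if t.1 == year then (if gM then (year, count, t.2.2) else (year, t.2.1, count)) else t

-- A's index scan is a map over the list plus an any-flag (each index is written at most once,
-- at its own step, so every read sees the original tuple)
lemma inner_fold_eq (year count : Int) (gM : Bool) :
    ∀ (rest done : List (Int × Int × Int)) (b : Bool),
    (PySem.List.pyRange (done.length : Int) ((done.length : Int) + (rest.length : Int)) 1).foldl
      (innerStep year count gM) (done ++ rest, b)
    = (done ++ rest.map (updTriple year count gM), b || rest.any (fun t => t.1 == year)) := by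
  intro rest
  induction rest with
  | nil =>
    intro done b
    rw [show ((done.length : Int) + ((List.length ([] : List (Int × Int × Int))) : Int)) = (done.length : Int) by simp,
        PySem.List.pyRange_one_eq_nil (le_refl _)]
    simp
  | cons t ts ih =>
    intro done b
    rw [PySem.List.pyRange_one_cons (by simp)]
    simp only [List.foldl_cons]
    have hget : PySem.List.pyGetD (done ++ t :: ts) ((done.length : Int)) (0, 0, 0) = t := by
      rw [PySem.List.pyGetD_natCast]
      simp [List.getD]
    by_cases hm : (t.1 == year) = true
    · set v := (if gM then (year, count, t.2.2) else (year, t.2.1, count)) with hv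
      have hstep : innerStep year count gM (done ++ t :: ts, b) ((done.length : Int))
          = ((done ++ [v]) ++ ts, true) := by
        rw [innerStep]
        simp only [hget, hm, if_pos]
        rw [PySem.List.pySetD_natCast, List.set_append_right _ _ (le_refl done.length)]
        simp [hv]
      rw [hstep]
      have harith : ((done.length : Int) + 1) = (((done ++ [v]).length : Int)) := by simp
      have harith2 : ((done.length : Int) + ((t :: ts).length : Int)) = (((done ++ [v]).length : Int) + (ts.length : Int)) := by
        simp; omega
      rw [harith, harith2, ih (done ++ [v]) true]
      simp [updTriple, hm, hv]
    · have hstep : innerStep year count gM (done ++ t :: ts, b) ((done.length : Int))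
          = ((done ++ [t]) ++ ts, b) := by
        rw [innerStep]
        simp only [hget, hm]
        simp
      rw [hstep]
      have harith : ((done.length : Int) + 1) = (((done ++ [t]).length : Int)) := by simp
      have harith2 : ((done.length : Int) + ((t :: ts).length : Int)) = (((done ++ [t]).length : Int) + (ts.length : Int)) := by
        simp; omega
      rw [harith, harith2, ih (done ++ [t]) b]
      simp [updTriple, hm]

lemma inner_spec (year count : Int) (gM : Bool) (lst : List (Int × Int × Int)) :
    nameIndexInner year count gM lst
      = (lst.map (updTriple year count gM), lst.any (fun t => t.1 == year)) := by
  have := inner_fold_eq year count gM lst [] false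
  simpa [nameIndexInner] using this

-- one record's effect on the touched name: A's conditional scan-or-append equals the
-- year-dict insert of the grouping characterisation
lemma step_name_case (year count : Int) (gM : Bool)
    (byYear : PySem.Dict Int (Int × Int))
    (hnd : byYear.keys.Nodup) :
    (if (byYear.items.map (fun q => (q.1, q.2.1, q.2.2))).any (fun t => t.1 == year) then
      (byYear.items.map (fun q => (q.1, q.2.1, q.2.2))).map (updTriple year count gM)
    else
      (byYear.items.map (fun q => (q.1, q.2.1, q.2.2))).map (updTriple year count gM) ++
        [if gM then (year, count, 0) else (year, 0, count)])
    = ((byYear.insert year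
        (if gM then (count, (byYear.getD year (0, 0)).2)
         else ((byYear.getD year (0, 0)).1, count))).items).map (fun q => (q.1, q.2.1, q.2.2)) := by
  by_cases hc : byYear.contains year = true
  · have hmem : year ∈ byYear.keys := (PySem.Dict.contains_iff_mem_keys _ _).mp hc
    have hex : ∃ q ∈ byYear.items, q.1 = year := by
      simpa [PySem.Dict.keys, List.mem_map] using hmem
    have hany : (byYear.items.map (fun q => (q.1, q.2.1, q.2.2))).any (fun t => t.1 == year) = true := by
      obtain ⟨q, hq, hq1⟩ := hex
      simp only [List.any_map, List.any_eq_true]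
      exact ⟨q, hq, by simp [hq1]⟩
    rw [hany, if_pos rfl, PySem.Dict.items_insert_of_contains _ _ hc]
    rw [List.map_map, List.map_map]
    apply List.map_congr_left
    intro q hq
    by_cases hqy : (q.1 == year) = true
    · have hq1 : q.1 = year := by simpa using hqy
      have hmf : byYear.getD year (0, 0) = q.2 := by
        apply PySem.Dict.getD_of_mem_items _ _ hnd
        rw [← hq1]; exact hq
      cases gM <;> simp [updTriple, hqy, hmf] <;> exact fun h => absurd hq1 h
    · simp [updTriple, hqy, Function.comp]
  · have hnm : year ∉ byYear.keys := fun h => hc ((PySem.Dict.contains_iff_mem_keys _ _).mpr h)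
    have hany : (byYear.items.map (fun q => (q.1, q.2.1, q.2.2))).any (fun t => t.1 == year) = false := by
      rw [List.any_eq_false]
      intro t ht
      simp only [List.mem_map] at ht
      obtain ⟨q, hq, rfl⟩ := ht
      have : q.1 ∈ byYear.keys := by
        simp only [PySem.Dict.keys]; exact List.mem_map_of_mem hq
      simp only [beq_iff_eq]
      intro h; exact hnm (h ▸ this)
    have hid : (byYear.items.map (fun q => (q.1, q.2.1, q.2.2))).map (updTriple year count gM)
        = byYear.items.map (fun q => (q.1, q.2.1, q.2.2)) := by
      rw [List.map_map]
      apply List.map_congr_left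
      intro q hq
      have hne : ((q.1, q.2.1, q.2.2).1 == year) = false := by
        have := List.any_eq_false.mp hany _ (List.mem_map_of_mem hq)
        simpa using this
      simp only [Function.comp]
      simp [updTriple, hne]
    have hcf : byYear.contains year = false := by simpa using hc
    rw [hany]
    simp only [Bool.false_eq_true, if_false]
    rw [hid, PySem.Dict.items_insert_of_not_contains _ _ hcf,
        PySem.Dict.getD_of_not_contains _ _ hcf]
    by_cases hg : gM
    · simp [hg]
    · simp [hg]

-- the seeding loop leaves every value empty
lemma seed_getD (l : List (Int × String × String × Int)) :
    ∀ (d : PySem.Dict String (List (Int × Int × Int))),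
    (∀ m, d.getD m [] = []) →
    ∀ n, (l.foldl (fun d r => d.insert r.2.1 ([] : List (Int × Int × Int))) d).getD n [] = [] := by
  induction l with
  | nil => intro d h n; simpa using h n
  | cons r l ih =>
    intro d h n
    simp only [List.foldl_cons]
    exact ih _ (fun m => by rw [PySem.Dict.getD_insert]; split <;> simp [h m]) n

-- main bisimulation: A's per-name list is the grouping dict's per-name year dict, flattened
lemma main_inv (l : List (Int × String × String × Int)) :
    ∀ (dA : PySem.Dict String (List (Int × Int × Int)))
      (dB : PySem.Dict String (PySem.Dict Int (Int × Int))),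
    (∀ n, ((dB.getD n PySem.Dict.empty).keys).Nodup) →
    (∀ n, dA.getD n [] = (dB.getD n PySem.Dict.empty).items.map (fun q => (q.1, q.2.1, q.2.2))) →
    (∀ n, (((l.foldl (fun idx r =>
        idx.insert r.2.1
          ((idx.getD r.2.1 PySem.Dict.empty).insert r.1
            (if r.2.2.1 == "M" then (r.2.2.2, ((idx.getD r.2.1 PySem.Dict.empty).getD r.1 (0, 0)).2)
             else (((idx.getD r.2.1 PySem.Dict.empty).getD r.1 (0, 0)).1, r.2.2.2)))) dB).getD n PySem.Dict.empty).keys).Nodup) ∧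
    (∀ n, (l.foldl (fun d r =>
        d.insert r.2.1
          (if (nameIndexInner r.1 r.2.2.2 (r.2.2.1 == "M") (d.getD r.2.1 [])).2 then
            (nameIndexInner r.1 r.2.2.2 (r.2.2.1 == "M") (d.getD r.2.1 [])).1
          else
            (nameIndexInner r.1 r.2.2.2 (r.2.2.1 == "M") (d.getD r.2.1 [])).1 ++
              [if r.2.2.1 == "M" then (r.1, r.2.2.2, 0) else (r.1, 0, r.2.2.2)])) dA).getD n []
      = ((l.foldl (fun idx r =>
        idx.insert r.2.1
          ((idx.getD r.2.1 PySem.Dict.empty).insert r.1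
            (if r.2.2.1 == "M" then (r.2.2.2, ((idx.getD r.2.1 PySem.Dict.empty).getD r.1 (0, 0)).2)
             else (((idx.getD r.2.1 PySem.Dict.empty).getD r.1 (0, 0)).1, r.2.2.2)))) dB).getD n PySem.Dict.empty).items.map
          (fun q => (q.1, q.2.1, q.2.2))) := by
  induction l with
  | nil => intro dA dB hB hI; exact ⟨hB, hI⟩
  | cons r l ih =>
    intro dA dB hB hI
    simp only [List.foldl_cons]
    apply ih
    · intro n
      rw [PySem.Dict.getD_insert]
      split
      · exact PySem.Dict.nodup_keys_insert _ _ _ (hB r.2.1)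
      · exact hB n
    · intro n
      rw [PySem.Dict.getD_insert, PySem.Dict.getD_insert]
      by_cases hn : n = r.2.1
      · rw [if_pos hn, if_pos hn]
        rw [inner_spec, hI r.2.1]
        exact step_name_case r.1 r.2.2.2 (r.2.2.1 == "M") _ (hB r.2.1)
      · rw [if_neg hn, if_neg hn]
        exact hI n

-- the final sort loop, pointwise
lemma sort_fold_getD (ks : List String) :
    ∀ (d : PySem.Dict String (List (Int × Int × Int))), ks.Nodup → ∀ n,
    (ks.foldl (fun d name => d.modify name [] pySortTuples) d).getD n []
      = if n ∈ ks then pySortTuples (d.getD n []) else d.getD n [] := by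
  induction ks with
  | nil => simp
  | cons k ks ih =>
    intro d hnd n
    simp only [List.foldl_cons]
    rw [ih _ (by simp_all) n]
    by_cases hn : n = k
    · subst hn
      have : n ∉ ks := by simp_all
      simp [this]
    · simp [PySem.Dict.getD_modify, hn]

-- a Set.update that adds nothing new is the identity
lemma set_update_absorb {s : PySem.Set String} {xs : List String}
    (h : ∀ x ∈ xs, x ∈ s) : PySem.Set.update s xs = s := by
  rw [PySem.Set.update_eq_append_filter]
  have : (PySem.Set.ofList xs).filter (fun y => !s.contains y) = [] := by
    rw [List.filter_eq_nil_iff]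
    intro y hy
    have : y ∈ xs := (PySem.Set.mem_ofList _ _).mp hy
    simp [h y this]
  rw [this, List.append_nil]

lemma keys_seedA (names : List (Int × String × String × Int)) :
    (seedA names).keys = PySem.Set.ofList (names.map (fun r => r.2.1)) := by
  rw [seedA, PySem.Dict.keys_foldl_insert_key names (fun r => r.2.1) (fun _ _ => []) _,
      PySem.Dict.keys_empty, PySem.Set.update_nil_left]

lemma keys_loopA (names : List (Int × String × String × Int)) :
    (loopA names).keys = PySem.Set.ofList (names.map (fun r => r.2.1)) := by
  rw [loopA, PySem.Dict.keys_foldl_insert_key names (fun r => r.2.1) _ _, keys_seedA]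
  exact set_update_absorb (fun x hx => (PySem.Set.mem_ofList _ _).mpr hx)

lemma keys_sortA (names : List (Int × String × String × Int)) :
    (sortA names).keys = PySem.Set.ofList (names.map (fun r => r.2.1)) := by
  rw [sortA, PySem.Dict.keys_foldl_modify _ _ (fun _ _ => pySortTuples) _, keys_loopA]
  exact set_update_absorb (fun x hx => hx)

-- the grouping dict restricted to one name is the year dict of that name's records
lemma aggD_getD_filter (l : List (Int × String × String × Int)) :
    ∀ (dB : PySem.Dict String (PySem.Dict Int (Int × Int))) (n : String),
    ((l.foldl (fun idx r =>
        idx.insert r.2.1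
          ((idx.getD r.2.1 PySem.Dict.empty).insert r.1
            (if r.2.2.1 == "M" then (r.2.2.2, ((idx.getD r.2.1 PySem.Dict.empty).getD r.1 (0, 0)).2)
             else (((idx.getD r.2.1 PySem.Dict.empty).getD r.1 (0, 0)).1, r.2.2.2)))) dB).getD n PySem.Dict.empty)
    = (l.filter (fun r => r.2.1 == n)).foldl (fun d r =>
        d.insert r.1
          (if r.2.2.1 == "M" then (r.2.2.2, (d.getD r.1 (0, 0)).2)
           else ((d.getD r.1 (0, 0)).1, r.2.2.2)))
      (dB.getD n PySem.Dict.empty) := by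
  induction l with
  | nil => intro dB n; simp
  | cons r l ih =>
    intro dB n
    simp only [List.foldl_cons]
    by_cases hn : r.2.1 = n
    · rw [List.filter_cons_of_pos (by simp [hn])]
      rw [ih, PySem.Dict.getD_insert, if_pos hn.symm, hn]
      simp
    · rw [List.filter_cons_of_neg (by simp [hn])]
      rw [ih, PySem.Dict.getD_insert, if_neg (fun h => hn (Eq.symm h))]

-- a year-dict lookup is the last-wins scan of the records
lemma dictAgg_getD_aux (rs : List (Int × String × String × Int)) (y : Int) :
    ∀ (d : PySem.Dict Int (Int × Int)) (mf : Int × Int), d.getD y (0, 0) = mf →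
    (rs.foldl (fun d r =>
        d.insert r.1
          (if r.2.2.1 == "M" then (r.2.2.2, (d.getD r.1 (0, 0)).2)
           else ((d.getD r.1 (0, 0)).1, r.2.2.2))) d).getD y (0, 0)
    = rs.foldl (fun mf r =>
        if r.1 == y then (if r.2.2.1 == "M" then (r.2.2.2, mf.2) else (mf.1, r.2.2.2)) else mf) mf := by
  induction rs with
  | nil => intro d mf h; simpa using h
  | cons r rs ih =>
    intro d mf h
    simp only [List.foldl_cons]
    apply ih
    rw [PySem.Dict.getD_insert]
    by_cases hy : y = r.1
    · rw [if_pos hy, ← hy, h]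
      simp
    · rw [if_neg hy, h]
      simp [show (r.1 == y) = false from beq_eq_false_iff_ne.mpr (Ne.symm hy)]

lemma dictAgg_getD (rs : List (Int × String × String × Int)) (y : Int) :
    (dictAgg rs).getD y (0, 0) = lastCounts rs y := by
  rw [dictAgg, lastCounts]
  exact dictAgg_getD_aux rs y PySem.Dict.empty (0, 0) (PySem.Dict.getD_empty _ _)

lemma keys_dictAgg (rs : List (Int × String × String × Int)) :
    (dictAgg rs).keys = PySem.Set.ofList (rs.map (fun r => r.1)) := by
  rw [dictAgg, PySem.Dict.keys_foldl_insert_key rs (fun r => r.1) _ _,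
      PySem.Dict.keys_empty, PySem.Set.update_nil_left]

lemma dictAgg_items (rs : List (Int × String × String × Int)) :
    (dictAgg rs).items
      = (PySem.Set.ofList (rs.map (fun r => r.1))).map (fun y => (y, lastCounts rs y)) := by
  rw [PySem.Dict.items_eq_map_keys (dictAgg rs)
        (by rw [keys_dictAgg]; exact PySem.Set.nodup_ofList _) (0, 0),
      keys_dictAgg]
  exact List.map_congr_left (fun y _ => by rw [dictAgg_getD])

-- sorting a list of cells keyed by distinct years is mapping over the sorted years
lemma pySort_set_map (zs : List Int) (g : Int → Int × Int) :
    pySortTuples ((PySem.Set.ofList zs).map (fun y => (y, g y)))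
      = (PySem.List.sorted (PySem.Set.ofList zs) (fun y => y)).map (fun y => (y, g y)) := by
  apply PySem.List.sorted_eq_of_perm_of_pairwise_lt
  · exact List.Perm.map _ (PySem.List.sorted_perm (PySem.Set.ofList zs) (fun y => y) false)
  · refine List.Pairwise.map _ ?_ (PySem.List.sorted_ofList_pairwise_lt zs)
    intro a b hab
    show tripleKey (a, g a) < tripleKey (b, g b)
    rw [tripleKey, tripleKey]
    exact Prod.Lex.toLex_lt_toLex.mpr (Or.inl hab)

-- B's skip-if-seen loop: keys
lemma skip_fold_keys (E : String → List (Int × Int × Int)) (l : List (Int × String × String × Int)) :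
    ∀ (d : PySem.Dict String (List (Int × Int × Int))),
    (l.foldl (fun out r => if out.contains r.2.1 then out else out.insert r.2.1 (E r.2.1)) d).keys
      = PySem.Set.update d.keys (l.map (fun r => r.2.1)) := by
  induction l with
  | nil => intro d; simp [PySem.Set.update_nil]
  | cons r l ih =>
    intro d
    simp only [List.foldl_cons, List.map_cons]
    rw [PySem.Set.update_cons]
    by_cases hc : d.contains r.2.1 = true
    · rw [if_pos hc, ih,
          PySem.Set.add_of_mem ((PySem.Dict.contains_iff_mem_keys _ _).mp hc)]
    · rw [if_neg (by simp [hc]), ih,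
          PySem.Dict.keys_insert_of_not_contains _ _ (by simpa using hc),
          PySem.Set.add_of_not_mem (fun h => hc ((PySem.Dict.contains_iff_mem_keys _ _).mpr h))]

-- B's skip-if-seen loop: lookups (first writer wins, value depends only on the key)
lemma skip_fold_getD (E : String → List (Int × Int × Int)) (l : List (Int × String × String × Int)) :
    ∀ (d : PySem.Dict String (List (Int × Int × Int))) (n : String),
    (l.foldl (fun out r => if out.contains r.2.1 then out else out.insert r.2.1 (E r.2.1)) d).getD n []
      = if n ∈ d.keys then d.getD n []
        else if n ∈ l.map (fun r => r.2.1) then E n else [] := by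
  induction l with
  | nil =>
    intro d n
    simp only [List.foldl_nil, List.map_nil, List.not_mem_nil, if_false]
    by_cases h : n ∈ d.keys
    · rw [if_pos h]
    · rw [if_neg h, PySem.Dict.getD_of_not_contains _ _
        (by simpa using fun hc => h ((PySem.Dict.contains_iff_mem_keys _ _).mp hc))]
  | cons r l ih =>
    intro d n
    simp only [List.foldl_cons, List.map_cons]
    by_cases hc : d.contains r.2.1 = true
    · rw [if_pos hc, ih]
      by_cases hk : n ∈ d.keys
      · rw [if_pos hk, if_pos hk]
      · rw [if_neg hk, if_neg hk]
        have hne : n ≠ r.2.1 := fun h =>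
          hk (h ▸ (PySem.Dict.contains_iff_mem_keys _ _).mp hc)
        exact if_congr (by simp [hne]) rfl rfl
    · rw [if_neg (by simp [hc]), ih]
      have hkr : r.2.1 ∉ d.keys := fun h => hc ((PySem.Dict.contains_iff_mem_keys _ _).mpr h)
      by_cases hn : n = r.2.1
      · subst hn
        simp [PySem.Dict.mem_keys_insert, hkr]
      · simp [PySem.Dict.mem_keys_insert, PySem.Dict.getD_insert, hn]
        exact if_congr Iff.rfl rfl (if_congr (by simp [hn]) rfl rfl)

lemma nameIndex_alt_items (names : List (Int × String × String × Int)) :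
    nameIndex_alt names
      = (PySem.Set.ofList (names.map (fun r => r.2.1))).map
          (fun n => (n, nameEntries names n)) := by
  rw [nameIndex_alt]
  have hkeys : (names.foldl (fun out r =>
      if out.contains r.2.1 then out else out.insert r.2.1 (nameEntries names r.2.1))
      PySem.Dict.empty).keys = PySem.Set.ofList (names.map (fun r => r.2.1)) := by
    rw [skip_fold_keys, PySem.Dict.keys_empty, PySem.Set.update_nil_left]
  rw [PySem.Dict.items_eq_map_keys _ (by rw [hkeys]; exact PySem.Set.nodup_ofList _) [], hkeys]
  apply List.map_congr_left
  intro n hn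
  rw [skip_fold_getD, PySem.Dict.keys_empty,
      if_neg (List.not_mem_nil),
      if_pos ((PySem.Set.mem_ofList _ _).mp hn)]

-- ===== VERDICT (by name: the statement is the Claim_ definition above) =====
theorem nameIndex_spec : Claim_equal_nameIndex := by
  intro names _
  unfold Spec_nameIndex
  rw [nameIndex_eq, nameIndex_alt_items]
  have hndS : (sortA names).keys.Nodup := by
    rw [keys_sortA]; exact PySem.Set.nodup_ofList _
  rw [PySem.Dict.items_eq_map_keys (sortA names) hndS [], keys_sortA]
  apply List.map_congr_left
  intro n hn
  have hinv := main_inv names (seedA names) PySem.Dict.empty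
    (fun m => by rw [PySem.Dict.getD_empty]; simp [PySem.Dict.keys_empty])
    (fun m => by
      rw [seedA, seed_getD names PySem.Dict.empty (fun k => PySem.Dict.getD_empty _ _) m,
          PySem.Dict.getD_empty]
      rfl)
  have hA : (loopA names).getD n [] = ((aggD names).getD n PySem.Dict.empty).items.map
      (fun q => (q.1, q.2.1, q.2.2)) := hinv.2 n
  have hsort : (sortA names).getD n [] = pySortTuples ((loopA names).getD n []) := by
    rw [sortA, sort_fold_getD (loopA names).keys (loopA names)
          (by rw [keys_loopA]; exact PySem.Set.nodup_ofList _) n,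
        if_pos (by rw [keys_loopA]; exact hn)]
  have hfilter : (aggD names).getD n PySem.Dict.empty
      = dictAgg (names.filter (fun r => r.2.1 == n)) := by
    rw [aggD, dictAgg, aggD_getD_filter, PySem.Dict.getD_empty]
  have htriple : ∀ (xs : List (Int × (Int × Int))),
      xs.map (fun q => (q.1, q.2.1, q.2.2)) = xs := fun xs => by
    simp
  rw [hsort, hA, hfilter, htriple, dictAgg_items, pySort_set_map]
  rfl
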